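-- pv_equiv track=rewrite | github.com/ankur2753/apply-jobs-automation | resume_modifier.py | get_relevant_skills
-- ===== SOURCE A (Python) =====
-- from typing import Dict, List
--
-- def get_relevant_skills(job_details: Dict, personal_details: Dict) -> List[str]:
--     """Gets a list of skills from the user's profile that are most relevant to the job requirements."""
--     all_skills = personal_details.get('skills', [])
--     job_requirements = [req.lower() for req in job_details.get('requirements', [])]
--
--     # Prioritize skills that match job requirements
--     relevant_skills = []
--     for skill in all_skills:
--         if any(req in skill.lower() for req in job_requirements):
--             relevant_skills.append(skill)
--
--     # Add remaining skills up to a limit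
--     for skill in all_skills:
--         if skill not in relevant_skills and len(relevant_skills) < 10:
--             relevant_skills.append(skill)
--
--     return relevant_skills
-- ===== SOURCE B (Python) =====
-- from typing import Dict, List
--
-- def get_relevant_skills(job_details: Dict, personal_details: Dict) -> List[str]:
--     """Single pass: partition skills into matched / first-seen extras, then append
--     extras up to the remaining budget in one closed-form slice."""
--     all_skills = personal_details.get('skills', [])
--     reqs = [r.lower() for r in job_details.get('requirements', [])]
--
--     matched = []
--     extras = []
--     seen = set()
--     for skill in all_skills:
--         if any(r in skill.lower() for r in reqs):
--             matched.append(skill)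
--             seen.add(skill)
--         elif skill not in seen:
--             extras.append(skill)
--             seen.add(skill)
--     return matched + extras[:max(0, 10 - len(matched))]
-- ===== Notes on version B (the rewrite author's own statement) =====
-- stated objective: alternative
-- what changed: One pass that partitions skills into matched and first-occurrence extras with a set (instead of A's two passes with an O(n) 'not in' scan over the growing result list), then appends extras by a closed-form slice of the remaining budget instead of re-checking the length per element.
import Mathlib
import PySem

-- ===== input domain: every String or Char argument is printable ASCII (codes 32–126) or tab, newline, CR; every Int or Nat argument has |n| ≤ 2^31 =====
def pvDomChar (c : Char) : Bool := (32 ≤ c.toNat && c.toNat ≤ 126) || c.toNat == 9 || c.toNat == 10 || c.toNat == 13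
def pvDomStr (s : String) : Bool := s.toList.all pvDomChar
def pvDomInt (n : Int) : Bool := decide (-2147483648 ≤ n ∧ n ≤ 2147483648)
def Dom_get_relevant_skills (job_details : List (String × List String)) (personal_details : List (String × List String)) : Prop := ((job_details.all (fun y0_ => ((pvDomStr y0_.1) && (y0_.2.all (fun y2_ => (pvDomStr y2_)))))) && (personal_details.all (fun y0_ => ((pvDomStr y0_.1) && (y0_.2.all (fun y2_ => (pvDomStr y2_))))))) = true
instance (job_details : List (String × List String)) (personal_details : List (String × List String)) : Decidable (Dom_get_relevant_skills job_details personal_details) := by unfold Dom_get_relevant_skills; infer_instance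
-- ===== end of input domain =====

-- B replaces A's two passes (the second doing a 'not in' scan of the growing result and a
-- per-element length check) by one partitioning pass with a set plus a closed-form slice
-- of the remaining budget; equal return value proved below (objective: alternative).

-- ===== PORT A =====
def get_relevant_skills (job_details : List (String × List String)) (personal_details : List (String × List String)) : List String :=
  let all_skills : List String := PySem.Dict.getD (PySem.Dict.mk personal_details) "skills" []
  let job_requirements : List String := (PySem.Dict.getD (PySem.Dict.mk job_details) "requirements" []).map PySem.Str.lower
  let relevant₁ := all_skills.foldl (fun acc skill =>
      if job_requirements.any (fun req => PySem.Str.isIn req (PySem.Str.lower skill)) then acc ++ [skill] else acc) []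
  all_skills.foldl (fun acc skill =>
      if skill ∉ acc ∧ acc.length < 10 then acc ++ [skill] else acc) relevant₁

-- ===== PORT B =====
def get_relevant_skills_alt (job_details : List (String × List String)) (personal_details : List (String × List String)) : List String :=
  let all_skills : List String := PySem.Dict.getD (PySem.Dict.mk personal_details) "skills" []
  let reqs : List String := (PySem.Dict.getD (PySem.Dict.mk job_details) "requirements" []).map PySem.Str.lower
  let st := all_skills.foldl (fun (st : List String × List String × PySem.Set String) skill =>
      if reqs.any (fun r => PySem.Str.isIn r (PySem.Str.lower skill)) then
        (st.1 ++ [skill], st.2.1, PySem.Set.add st.2.2 skill)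
      else if PySem.Set.contains st.2.2 skill then st
      else (st.1, st.2.1 ++ [skill], PySem.Set.add st.2.2 skill))
    ([], [], PySem.Set.empty)
  -- Nat subtraction truncates at 0 = Source B's max(0, 10 - len(matched))
  st.1 ++ st.2.1.take (10 - st.1.length)

-- ===== PRECONDITION & SPEC =====
def Spec_get_relevant_skills (job_details : List (String × List String)) (personal_details : List (String × List String)) (out : List String) : Prop := out = get_relevant_skills_alt job_details personal_details
instance (job_details : List (String × List String)) (personal_details : List (String × List String)) (out : List String) : Decidable (Spec_get_relevant_skills job_details personal_details out) := by unfold Spec_get_relevant_skills; infer_instance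

-- ===== CLAIM (what is proved, stated in full; the proofs are below) =====
def Claim_equal_get_relevant_skills : Prop := ∀ (job_details : List (String × List String)) (personal_details : List (String × List String)), Dom_get_relevant_skills job_details personal_details → Spec_get_relevant_skills job_details personal_details (get_relevant_skills job_details personal_details)

-- ===== LEMMAS AND PROOFS =====

-- The "extras": first occurrences of skills with p = false that are not in `seen`.
def pvE (p : String → Bool) (seen : List String) : List String → List String
  | [] => []
  | s :: t => if p s then pvE p seen t
              else if s ∈ seen then pvE p seen t
              else s :: pvE p (s :: seen) t

lemma pvE_congr (p : String → Bool) (l : List String) : ∀ s1 s2 : List String,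
    (∀ x, x ∈ s1 ↔ x ∈ s2) → pvE p s1 l = pvE p s2 l := by
  induction l with
  | nil => intros; rfl
  | cons a t ih =>
    intro s1 s2 h
    simp only [pvE]
    by_cases hp : p a
    · rw [if_pos hp, if_pos hp]; exact ih _ _ h
    · rw [if_neg hp, if_neg hp]
      by_cases hm : a ∈ s1
      · rw [if_pos hm, if_pos ((h a).mp hm)]; exact ih _ _ h
      · rw [if_neg hm, if_neg (fun c => hm ((h a).mpr c))]
        exact congrArg (a :: ·) (ih _ _ (by intro x; simp only [List.mem_cons, h x]))

lemma pvE_snoc (p : String → Bool) (s : String) (l : List String) : ∀ seen : List String,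
    pvE p seen (l ++ [s]) = pvE p seen l ++ pvE p (seen ++ pvE p seen l) [s] := by
  induction l with
  | nil => intro seen; simp [pvE]
  | cons a t ih =>
    intro seen
    by_cases hp : p a
    · have e : ∀ u, pvE p seen (a :: u) = pvE p seen u := fun u => by
        simp only [pvE, if_pos hp]
      rw [List.cons_append, e, e, ih seen]
    · by_cases hm : a ∈ seen
      · have e : ∀ u, pvE p seen (a :: u) = pvE p seen u := fun u => by
          simp only [pvE, if_neg hp, if_pos hm]
        rw [List.cons_append, e, e, ih seen]
      · have e : ∀ u, pvE p seen (a :: u) = a :: pvE p (a :: seen) u := fun u => by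
          simp only [pvE, if_neg hp, if_neg hm]
        rw [List.cons_append, e, e, ih (a :: seen), List.cons_append]
        refine congrArg (a :: ·) (congrArg _ ?_)
        exact pvE_congr p [s] _ _ (by
          intro x
          simp only [List.mem_append, List.mem_cons]
          tauto)

lemma pv_loopA (p : String → Bool) (M : List String) (hM : ∀ s ∈ M, p s = true)
    (l : List String) :
    (∀ s ∈ l, p s = true → s ∈ M) →
    l.foldl (fun acc s => if s ∉ acc ∧ acc.length < 10 then acc ++ [s] else acc) M
      = M ++ (pvE p [] l).take (10 - M.length) := by
  induction l using List.reverseRecOn with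
  | nil => intro _; simp [pvE]
  | append_singleton t s ih =>
    intro hl
    rw [List.foldl_append, ih (fun x hx hpx => hl x (List.mem_append_left _ hx) hpx)]
    rw [pvE_snoc]
    simp only [List.nil_append]
    set E := pvE p [] t with hE
    set k := 10 - M.length with hk
    simp only [List.foldl_cons, List.foldl_nil, pvE]
    have htklen : (E.take k).length = min k E.length := by simp
    by_cases hp : p s
    · have hsM : s ∈ M := hl s (by simp) hp
      rw [if_pos hp, if_neg (fun hc => hc.1 (List.mem_append_left _ hsM))]
      simp
    · rw [if_neg hp]
      have hsnM : s ∉ M := fun c => hp (hM s c)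
      by_cases hmem : s ∈ E
      · rw [if_pos hmem]
        by_cases hst : s ∈ E.take k
        · rw [if_neg (fun hc => hc.1 (List.mem_append_right _ hst))]
          simp
        · have hklt : k ≤ E.length := by
            by_contra h
            exact hst (by rw [List.take_of_length_le (by omega)]; exact hmem)
          have hlen : ¬ (M ++ E.take k).length < 10 := by
            rw [List.length_append, htklen]; omega
          rw [if_neg (fun hc => hlen hc.2)]
          simp
      · rw [if_neg hmem]
        have hsnacc : s ∉ M ++ E.take k := by
          intro h
          rcases List.mem_append.mp h with h | h
          · exact hsnM h
          · exact hmem (List.mem_of_mem_take h)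
        by_cases h10 : (M ++ E.take k).length < 10
        · rw [if_pos ⟨hsnacc, h10⟩]
          have hlen : M.length + min k E.length < 10 := by
            rw [List.length_append, htklen] at h10; exact h10
          have hEk : E.length < k := by omega
          rw [List.take_of_length_le (by omega),
              List.take_of_length_le (by rw [List.length_append, List.length_cons]; simp; omega)]
          simp
        · rw [if_neg (fun hc => h10 hc.2)]
          have hlen : ¬ M.length + min k E.length < 10 := by
            rw [List.length_append, htklen] at h10; exact h10
          have hkE : k ≤ E.length := by omega
          rw [List.take_append_of_le_length hkE]

lemma pv_loopB (p : String → Bool) (l : List String) :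
    ∀ (m e : List String) (seen : PySem.Set String),
    (∀ s, p s = false → (s ∈ seen ↔ s ∈ e)) →
    (l.foldl (fun (st : List String × List String × PySem.Set String) skill =>
        if p skill then (st.1 ++ [skill], st.2.1, PySem.Set.add st.2.2 skill)
        else if PySem.Set.contains st.2.2 skill then st
        else (st.1, st.2.1 ++ [skill], PySem.Set.add st.2.2 skill)) (m, e, seen)).1
        = m ++ l.filter p
    ∧ (l.foldl (fun (st : List String × List String × PySem.Set String) skill =>
        if p skill then (st.1 ++ [skill], st.2.1, PySem.Set.add st.2.2 skill)
        else if PySem.Set.contains st.2.2 skill then st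
        else (st.1, st.2.1 ++ [skill], PySem.Set.add st.2.2 skill)) (m, e, seen)).2.1
        = e ++ pvE p e l := by
  induction l with
  | nil => intro m e seen _; simp [pvE]
  | cons a t ih =>
    intro m e seen hinv
    simp only [List.foldl_cons]
    by_cases hp : p a
    · rw [if_pos hp]
      have hinv' : ∀ s, p s = false → (s ∈ PySem.Set.add seen a ↔ s ∈ e) := by
        intro s hs
        rw [PySem.Set.mem_add]
        constructor
        · rintro (h | rfl)
          · exact (hinv s hs).mp h
          · rw [hp] at hs; exact absurd hs (by simp)
        · intro h; exact Or.inl ((hinv s hs).mpr h)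
      obtain ⟨h1, h2⟩ := ih (m ++ [a]) e (PySem.Set.add seen a) hinv'
      refine ⟨?_, ?_⟩
      · rw [h1, List.filter_cons_of_pos hp]; simp
      · rw [h2]; simp only [pvE, hp, if_true]
    · have hpf : p a = false := by simpa using hp
      rw [if_neg hp]
      by_cases hc : a ∈ seen
      · rw [if_pos (by rw [PySem.Set.contains_iff]; exact hc)]
        obtain ⟨h1, h2⟩ := ih m e seen hinv
        have hae : a ∈ e := (hinv a hpf).mp hc
        refine ⟨?_, ?_⟩
        · rw [h1, List.filter_cons_of_neg (by simp [hpf])]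
        · rw [h2]; simp only [pvE, hpf, Bool.false_eq_true, if_false, if_pos hae]
      · rw [if_neg (fun h => hc (by rwa [PySem.Set.contains_iff] at h))]
        have hane : a ∉ e := fun h => hc ((hinv a hpf).mpr h)
        have hinv' : ∀ s, p s = false → (s ∈ PySem.Set.add seen a ↔ s ∈ e ++ [a]) := by
          intro s hs
          rw [PySem.Set.mem_add, List.mem_append, List.mem_singleton]
          exact or_congr (hinv s hs) Iff.rfl
        obtain ⟨h1, h2⟩ := ih m (e ++ [a]) (PySem.Set.add seen a) hinv'
        refine ⟨?_, ?_⟩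
        · rw [h1, List.filter_cons_of_neg (by simp [hpf])]
        · rw [h2]
          simp only [pvE, hpf, Bool.false_eq_true, if_false, if_neg hane, List.append_assoc,
            List.singleton_append]
          congr 1
          refine congrArg (a :: ·) (pvE_congr p t _ _ ?_)
          intro x
          simp only [List.mem_append, List.mem_cons]
          tauto

-- ===== VERDICT (by name: the statement is the Claim_ definition above) =====
theorem get_relevant_skills_spec : Claim_equal_get_relevant_skills := by
  intro jd pd _
  unfold Spec_get_relevant_skills get_relevant_skills get_relevant_skills_alt
  simp only []
  set all_skills : List String := PySem.Dict.getD (PySem.Dict.mk pd) "skills" [] with hsk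
  set p : String → Bool := fun skill =>
    ((PySem.Dict.getD (PySem.Dict.mk jd) "requirements" []).map PySem.Str.lower).any
      (fun r => PySem.Str.isIn r (PySem.Str.lower skill)) with hp
  have hA1 : all_skills.foldl (fun acc skill => if p skill then acc ++ [skill] else acc) ([] : List String)
      = all_skills.filter p := by
    rw [PySem.List.foldl_append_if_eq_filter]; simp
  obtain ⟨h1, h2⟩ := pv_loopB p all_skills [] [] PySem.Set.empty
    (by intro s _; simp [PySem.Set.empty])
  have hB := pv_loopA p (all_skills.filter p) (fun s hs => (List.mem_filter.mp hs).2)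
    all_skills (fun s hs hps => List.mem_filter.mpr ⟨hs, hps⟩)
  rw [hA1, hB, h1, h2]
  simp
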